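-- pv_equiv track=rewrite | github.com/Niko-Orozco/Sistemas-Distribuidos | ParcialServidorGrupos/ServidorGrupos/server.py | already_In_Group
-- ===== SOURCE A (Python) =====
-- matrix_of_groups =  [['add','m1','m2', 'm4', 'nm'],
--                     ['sub', 'm3', 'm4', 'nm', 'nm'],
--                     ['mul', 'm1', 'm4', 'nm', 'nm'],
--                     ['empty','nm','nm', 'nm', 'nm'],
--                     ['empty','nm','nm', 'nm', 'nm'],
--                     ['empty','nm','nm', 'nm', 'nm'],
--                     ['log','m2','m3', 'nm', 'nm']]
--
-- def already_In_Group(machine_id, detail):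
--     is_member = False
--     if(detail == '1'):
--         for i in range(len(matrix_of_groups)):
--             if(matrix_of_groups[i][0] == 'add'):
--                 for j in range(len(matrix_of_groups[i]) - 1):
--                     if(matrix_of_groups[i][j+1] == machine_id):
--                         is_member = True
--                         break
--     if(detail == '2'):
--         for i in range(len(matrix_of_groups)):
--             if(matrix_of_groups[i][0] == 'sub'):
--                 for j in range(len(matrix_of_groups[i]) - 1):
--                     if(matrix_of_groups[i][j+1] == machine_id):
--                         is_member = True
--                         break
--     if(detail == '3'):
--         for i in range(len(matrix_of_groups)):
--             if(matrix_of_groups[i][0] == 'mul'):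
--                 for j in range(len(matrix_of_groups[i]) - 1):
--                     if(matrix_of_groups[i][j+1] == machine_id):
--                         is_member = True
--                         break
--     if(detail == '4'):
--         for i in range(len(matrix_of_groups)):
--             if(matrix_of_groups[i][0] == 'div'):
--                 for j in range(len(matrix_of_groups[i]) - 1):
--                     if(matrix_of_groups[i][j+1] == machine_id):
--                         is_member = True
--                         break
--     if(detail == '5'):
--         for i in range(len(matrix_of_groups)):
--             if(matrix_of_groups[i][0] == 'pow'):
--                 for j in range(len(matrix_of_groups[i]) - 1):
--                     if(matrix_of_groups[i][j+1] == machine_id):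
--                         is_member = True
--                         break
--     if(detail == '6'):
--         for i in range(len(matrix_of_groups)):
--             if(matrix_of_groups[i][0] == 'rad'):
--                 for j in range(len(matrix_of_groups[i]) - 1):
--                     if(matrix_of_groups[i][j+1] == machine_id):
--                         is_member = True
--                         break
--     if(detail == '7'):
--         for i in range(len(matrix_of_groups)):
--             if(matrix_of_groups[i][0] == 'log'):
--                 for j in range(len(matrix_of_groups[i]) - 1):
--                     if(matrix_of_groups[i][j+1] == machine_id):
--                         is_member = True
--                         break
--     return is_member
-- ===== SOURCE B (Python) =====
-- matrix_of_groups =  [['add','m1','m2', 'm4', 'nm'],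
--                     ['sub', 'm3', 'm4', 'nm', 'nm'],
--                     ['mul', 'm1', 'm4', 'nm', 'nm'],
--                     ['empty','nm','nm', 'nm', 'nm'],
--                     ['empty','nm','nm', 'nm', 'nm'],
--                     ['empty','nm','nm', 'nm', 'nm'],
--                     ['log','m2','m3', 'nm', 'nm']]
--
-- # Inverted index, built once at import time: the set of (detail, machine) pairs
-- # that are members.  Each group name is translated back to its detail digit.
-- _DETAIL_OF_OP = {'add': '1', 'sub': '2', 'mul': '3', 'div': '4',
--                  'pow': '5', 'rad': '6', 'log': '7'}
--
-- _MEMBERS = set()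
-- for _row in matrix_of_groups:
--     _d = _DETAIL_OF_OP.get(_row[0])
--     if _d is not None:
--         for _m in _row[1:]:
--             _MEMBERS.add((_d, _m))
--
-- def already_In_Group(machine_id, detail):
--     return (detail, machine_id) in _MEMBERS
-- ===== Notes on version B (the rewrite author's own statement) =====
-- stated objective: alternative
-- what changed: Instead of dispatching on the detail and scanning the matrix per call, B precomputes once an inverted index: the set of (detail, machine) pairs occurring in the matrix; the function is a single O(1) set-membership test.
import Mathlib
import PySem

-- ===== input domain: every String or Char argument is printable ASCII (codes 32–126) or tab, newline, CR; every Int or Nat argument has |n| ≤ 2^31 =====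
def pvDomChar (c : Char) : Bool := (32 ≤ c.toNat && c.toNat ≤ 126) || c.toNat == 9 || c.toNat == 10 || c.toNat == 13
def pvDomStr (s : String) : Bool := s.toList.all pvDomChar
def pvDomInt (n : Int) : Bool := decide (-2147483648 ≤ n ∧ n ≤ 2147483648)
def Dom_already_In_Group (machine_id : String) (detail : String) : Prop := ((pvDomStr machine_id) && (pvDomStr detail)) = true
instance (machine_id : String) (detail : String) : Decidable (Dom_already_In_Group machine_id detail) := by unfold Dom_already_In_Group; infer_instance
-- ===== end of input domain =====

-- B precomputes once an inverted index — the set of (detail, machine) pairs present in the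
-- matrix — and answers each call by a single set-membership test (objective: alternative).

-- ===== PORT A =====
def pvMatrixA : List (List String) :=
  [["add","m1","m2","m4","nm"],
   ["sub","m3","m4","nm","nm"],
   ["mul","m1","m4","nm","nm"],
   ["empty","nm","nm","nm","nm"],
   ["empty","nm","nm","nm","nm"],
   ["empty","nm","nm","nm","nm"],
   ["log","m2","m3","nm","nm"]]

-- inner 'for j in range(len(row)-1): if row[j+1]==machine_id: is_member=True; break'
def pvInnerA (machine_id : String) (row : List String) : List Int → Bool → Bool
  | [], is_member => is_member
  | j :: js, is_member =>
    if PySem.List.pyGetD row (j + 1) "" == machine_id then true   -- break with is_member = True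
    else pvInnerA machine_id row js is_member

-- outer 'for i in range(len(matrix_of_groups)): if matrix_of_groups[i][0]==op: <inner loop>'
def pvOuterA (machine_id op : String) : List Int → Bool → Bool
  | [], is_member => is_member
  | i :: is', is_member =>
    let row := PySem.List.pyGetD pvMatrixA i []
    let is_member :=
      if PySem.List.pyGetD row 0 "" == op then
        pvInnerA machine_id row (PySem.List.pyRange 0 ((row.length : Int) - 1) 1) is_member
      else is_member
    pvOuterA machine_id op is' is_member

-- one 'if(detail == t): for i in range(len(matrix_of_groups)): …' block
def pvBranchA (machine_id detail target op : String) (is_member : Bool) : Bool :=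
  if detail == target then
    pvOuterA machine_id op (PySem.List.pyRange 0 (pvMatrixA.length : Int) 1) is_member
  else is_member

def already_In_Group (machine_id : String) (detail : String) : Bool :=
  let is_member := false
  let is_member := pvBranchA machine_id detail "1" "add" is_member
  let is_member := pvBranchA machine_id detail "2" "sub" is_member
  let is_member := pvBranchA machine_id detail "3" "mul" is_member
  let is_member := pvBranchA machine_id detail "4" "div" is_member
  let is_member := pvBranchA machine_id detail "5" "pow" is_member
  let is_member := pvBranchA machine_id detail "6" "rad" is_member
  let is_member := pvBranchA machine_id detail "7" "log" is_member
  is_member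

-- ===== PORT B =====
-- _DETAIL_OF_OP
def pvDetailOfOp : PySem.Dict String String :=
  PySem.Dict.ofList [("add","1"),("sub","2"),("mul","3"),("div","4"),("pow","5"),("rad","6"),("log","7")]

-- the module-level index build: for _row in matrix: d = map.get(row[0]); for _m in row[1:]: add (d,_m)
def pvMembersB : PySem.Set (String × String) :=
  pvMatrixA.foldl (fun s row =>
    match pvDetailOfOp.get? (PySem.List.pyGetD row 0 "") with
    | none => s
    | some d => (PySem.List.slice row (some 1) none).foldl (fun s m => PySem.Set.add s (d, m)) s)
    PySem.Set.empty

def already_In_Group_alt (machine_id : String) (detail : String) : Bool :=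
  PySem.Set.contains pvMembersB (detail, machine_id)

-- ===== PRECONDITION & SPEC =====
def Spec_already_In_Group (machine_id : String) (detail : String) (out : Bool) : Prop := out = already_In_Group_alt machine_id detail
instance (machine_id : String) (detail : String) (out : Bool) : Decidable (Spec_already_In_Group machine_id detail out) := by unfold Spec_already_In_Group; infer_instance

-- ===== CLAIM (what is proved, stated in full; the proofs are below) =====
def Claim_equal_already_In_Group : Prop := ∀ (machine_id : String) (detail : String), Dom_already_In_Group machine_id detail → Spec_already_In_Group machine_id detail (already_In_Group machine_id detail)

-- ===== LEMMAS AND PROOFS =====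

-- the index, evaluated once
theorem pv_members_eval : pvMembersB =
    [("1","m1"),("1","m2"),("1","m4"),("1","nm"),
     ("2","m3"),("2","m4"),("2","nm"),
     ("3","m1"),("3","m4"),("3","nm"),
     ("7","m2"),("7","m3"),("7","nm")] := by decide

set_option maxHeartbeats 2000000 in
set_option maxRecDepth 4000 in
theorem pv_a_case_1 (m : String) : already_In_Group m "1" =
    (decide ("m1" = m) || (decide ("m2" = m) || (decide ("m4" = m) || decide ("nm" = m)))) := by
  simp [already_In_Group, pvBranchA, pvOuterA, pvInnerA, pvMatrixA,
    PySem.List.pyRange_one_cons, PySem.List.pyGetD_eq_getElem]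

set_option maxHeartbeats 2000000 in
set_option maxRecDepth 4000 in
theorem pv_a_case_2 (m : String) : already_In_Group m "2" =
    (decide ("m3" = m) || (decide ("m4" = m) || decide ("nm" = m))) := by
  simp [already_In_Group, pvBranchA, pvOuterA, pvInnerA, pvMatrixA,
    PySem.List.pyRange_one_cons, PySem.List.pyGetD_eq_getElem]

set_option maxHeartbeats 2000000 in
set_option maxRecDepth 4000 in
theorem pv_a_case_3 (m : String) : already_In_Group m "3" =
    (decide ("m1" = m) || (decide ("m4" = m) || decide ("nm" = m))) := by
  simp [already_In_Group, pvBranchA, pvOuterA, pvInnerA, pvMatrixA,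
    PySem.List.pyRange_one_cons, PySem.List.pyGetD_eq_getElem]

set_option maxHeartbeats 2000000 in
set_option maxRecDepth 4000 in
theorem pv_a_case_7 (m : String) : already_In_Group m "7" =
    (decide ("m2" = m) || (decide ("m3" = m) || decide ("nm" = m))) := by
  simp [already_In_Group, pvBranchA, pvOuterA, pvInnerA, pvMatrixA,
    PySem.List.pyRange_one_cons, PySem.List.pyGetD_eq_getElem]

set_option maxHeartbeats 2000000 in
set_option maxRecDepth 4000 in
theorem pv_a_case_other (m d : String) (h1 : ¬ d = "1") (h2 : ¬ d = "2") (h3 : ¬ d = "3")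
    (h7 : ¬ d = "7") : already_In_Group m d = false := by
  by_cases h4 : d = "4"
  · subst h4
    simp [already_In_Group, pvBranchA, pvOuterA, pvMatrixA,
      PySem.List.pyRange_one_cons, PySem.List.pyGetD_eq_getElem]
  by_cases h5 : d = "5"
  · subst h5
    simp [already_In_Group, pvBranchA, pvOuterA, pvMatrixA,
      PySem.List.pyRange_one_cons, PySem.List.pyGetD_eq_getElem]
  by_cases h6 : d = "6"
  · subst h6
    simp [already_In_Group, pvBranchA, pvOuterA, pvMatrixA,
      PySem.List.pyRange_one_cons, PySem.List.pyGetD_eq_getElem]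
  simp [already_In_Group, pvBranchA, h1, h2, h3, h4, h5, h6, h7]

theorem pv_alt_case_1 (m : String) : already_In_Group_alt m "1" =
    (decide ("m1" = m) || (decide ("m2" = m) || (decide ("m4" = m) || decide ("nm" = m)))) := by
  simp [already_In_Group_alt, pv_members_eval, List.contains_eq_mem, Prod.ext_iff, eq_comm]

theorem pv_alt_case_2 (m : String) : already_In_Group_alt m "2" =
    (decide ("m3" = m) || (decide ("m4" = m) || decide ("nm" = m))) := by
  simp [already_In_Group_alt, pv_members_eval, List.contains_eq_mem, Prod.ext_iff, eq_comm]

theorem pv_alt_case_3 (m : String) : already_In_Group_alt m "3" =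
    (decide ("m1" = m) || (decide ("m4" = m) || decide ("nm" = m))) := by
  simp [already_In_Group_alt, pv_members_eval, List.contains_eq_mem, Prod.ext_iff, eq_comm]

theorem pv_alt_case_7 (m : String) : already_In_Group_alt m "7" =
    (decide ("m2" = m) || (decide ("m3" = m) || decide ("nm" = m))) := by
  simp [already_In_Group_alt, pv_members_eval, List.contains_eq_mem, Prod.ext_iff, eq_comm]

theorem pv_alt_case_other (m d : String) (h1 : ¬ d = "1") (h2 : ¬ d = "2") (h3 : ¬ d = "3")
    (h7 : ¬ d = "7") : already_In_Group_alt m d = false := by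
  simp [already_In_Group_alt, pv_members_eval, List.contains_eq_mem, Prod.ext_iff, h1, h2, h3, h7]

-- ===== VERDICT (by name: the statement is the Claim_ definition above) =====
theorem already_In_Group_spec : Claim_equal_already_In_Group := by
  intro m d _
  unfold Spec_already_In_Group
  by_cases h1 : d = "1"
  · subst h1; rw [pv_a_case_1, pv_alt_case_1]
  by_cases h2 : d = "2"
  · subst h2; rw [pv_a_case_2, pv_alt_case_2]
  by_cases h3 : d = "3"
  · subst h3; rw [pv_a_case_3, pv_alt_case_3]
  by_cases h7 : d = "7"
  · subst h7; rw [pv_a_case_7, pv_alt_case_7]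
  rw [pv_a_case_other m d h1 h2 h3 h7, pv_alt_case_other m d h1 h2 h3 h7]
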